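-- pv_equiv track=rewrite | github.com/kimhyew1/BAEKJOON | 프로그래머스/0/181893. 배열 조각하기/배열 조각하기.py | solution
-- ===== SOURCE A (Python) =====
-- def solution(arr, query) :
--     answer = arr.copy()
--     for ind in range(len(query)) :
--         i = query[ind]
--         if ind%2 == 0 :
--             answer = answer[:i+1]
--         else :
--             answer = answer[i:]
--     return answer
-- ===== SOURCE B (Python) =====
-- def solution(arr, query):
--     # Track left/right offsets through the queries; one final slice of arr.
--     lo, hi = 0, len(arr)
--     for ind, q in enumerate(query):
--         n = hi - lo
--         j = q + 1 if ind % 2 == 0 else q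
--         if j < 0:
--             j += n
--         if j < 0:
--             j = 0
--         elif j > n:
--             j = n
--         if ind % 2 == 0:
--             hi = lo + j
--         else:
--             lo += j
--     return arr[lo:hi]
-- ===== Notes on version B (the rewrite author's own statement) =====
-- stated objective: alternative
-- what changed: Instead of materialising a new list slice for every query, B tracks the current window as a pair of offsets (lo, hi), applies Python's slice-clamping arithmetic to the offsets for each query, and takes a single slice of the original array at the end.
import Mathlib
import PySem

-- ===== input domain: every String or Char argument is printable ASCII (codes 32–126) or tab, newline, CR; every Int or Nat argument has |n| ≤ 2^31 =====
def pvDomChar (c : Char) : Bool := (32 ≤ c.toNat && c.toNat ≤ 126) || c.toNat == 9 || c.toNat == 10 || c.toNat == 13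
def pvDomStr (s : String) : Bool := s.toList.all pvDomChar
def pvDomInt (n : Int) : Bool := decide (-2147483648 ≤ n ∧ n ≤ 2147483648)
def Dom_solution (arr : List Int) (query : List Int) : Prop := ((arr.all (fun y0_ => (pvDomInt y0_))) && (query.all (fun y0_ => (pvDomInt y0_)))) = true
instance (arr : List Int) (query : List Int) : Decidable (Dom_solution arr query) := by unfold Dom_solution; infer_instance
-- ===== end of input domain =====

-- B replaces A's repeated list slicing with offset tracking and one final slice of the original array.
-- ===== PORT A =====
def solutionLoop (answer : List Int) (ind : Nat) (qs : List Int) : List Int :=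
  match qs with
  | [] => answer
  | i :: rest =>
    if ind % 2 == 0 then
      solutionLoop (PySem.List.slice answer none (some (i + 1))) (ind + 1) rest
    else
      solutionLoop (PySem.List.slice answer (some i) none) (ind + 1) rest

def solution (arr : List Int) (query : List Int) : List Int :=
  solutionLoop arr 0 query

-- ===== PORT B =====
def clampB (n j : Int) : Int :=
  let j1 := if j < 0 then j + n else j
  if j1 < 0 then 0 else if j1 > n then n else j1

def altLoop (ind : Nat) (lo hi : Int) (qs : List Int) : Int × Int :=
  match qs with
  | [] => (lo, hi)
  | q :: rest =>
    let n := hi - lo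
    let j := clampB n (if ind % 2 == 0 then q + 1 else q)
    if ind % 2 == 0 then altLoop (ind + 1) lo (lo + j) rest
    else altLoop (ind + 1) (lo + j) hi rest

def solution_alt (arr : List Int) (query : List Int) : List Int :=
  let p := altLoop 0 0 (arr.length : Int) query
  PySem.List.slice arr (some p.1) (some p.2)

-- ===== PRECONDITION & SPEC =====
def Spec_solution (arr : List Int) (query : List Int) (out : List Int) : Prop := out = solution_alt arr query
instance (arr : List Int) (query : List Int) (out : List Int) : Decidable (Spec_solution arr query out) := by unfold Spec_solution; infer_instance

-- ===== CLAIM (what is proved, stated in full; the proofs are below) =====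
def Claim_equal_solution : Prop := ∀ (arr : List Int) (query : List Int), Dom_solution arr query → Spec_solution arr query (solution arr query)

-- ===== LEMMAS AND PROOFS =====

lemma clampB_eq (n : Nat) (j : Int) :
    clampB (n : Int) j = ((PySem.List.clampIdx n j : Nat) : Int) := by
  simp only [clampB, PySem.List.clampIdx]
  split_ifs <;> omega

lemma slice_none_some_eq {α : Type} (xs : List α) (t : Int) :
    PySem.List.slice xs none (some t) = xs.take (PySem.List.clampIdx xs.length t) := by
  simp [PySem.List.slice]

lemma loop_eq (arr : List Int) : ∀ (qs : List Int) (ind : Nat) (a b : Nat),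
    a ≤ b → b ≤ arr.length →
    solutionLoop ((arr.drop a).take (b - a)) ind qs =
      PySem.List.slice arr (some ((altLoop ind (a : Int) (b : Int) qs).1))
        (some ((altLoop ind (a : Int) (b : Int) qs).2)) := by
  intro qs
  induction qs with
  | nil =>
    intro ind a b hab hb
    simp [solutionLoop, altLoop, PySem.List.slice_natCast]
  | cons q rest ih =>
    intro ind a b hab hb
    have hlen : ((arr.drop a).take (b - a)).length = b - a := by
      simp [List.length_take, List.length_drop]; omega
    by_cases hpar : ind % 2 = 0
    · -- even: answer = answer[:q+1]
      set j := PySem.List.clampIdx (b - a) (q + 1) with hj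
      have hjle : j ≤ b - a := PySem.List.clampIdx_le _ _
      have hstep : PySem.List.slice ((arr.drop a).take (b - a)) none (some (q + 1))
          = (arr.drop a).take ((a + j) - a) := by
        rw [slice_none_some_eq, hlen, List.take_take]
        congr 1
        omega
      have hB : clampB ((b : Int) - (a : Int)) (q + 1) = ((j : Nat) : Int) := by
        have : ((b : Int) - (a : Int)) = ((b - a : Nat) : Int) := by omega
        rw [this, clampB_eq]
      simp only [solutionLoop, altLoop, hpar, beq_self_eq_true, if_true]
      rw [hstep]
      have hcast : (a : Int) + clampB ((b:Int) - (a:Int)) (q + 1) = ((a + j : Nat) : Int) := by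
        rw [hB]; push_cast; ring
      rw [hcast]
      exact ih (ind + 1) a (a + j) (by omega) (by omega)
    · -- odd: answer = answer[q:]
      set j := PySem.List.clampIdx (b - a) q with hj
      have hjle : j ≤ b - a := PySem.List.clampIdx_le _ _
      have hstep : PySem.List.slice ((arr.drop a).take (b - a)) (some q) none
          = (arr.drop (a + j)).take (b - (a + j)) := by
        rw [PySem.List.slice_some_none, hlen, List.drop_take, List.drop_drop]
        congr 1
        omega
      have hB : clampB ((b : Int) - (a : Int)) q = ((j : Nat) : Int) := by
        have : ((b : Int) - (a : Int)) = ((b - a : Nat) : Int) := by omega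
        rw [this, clampB_eq]
      have hpar' : (ind % 2 == 0) = false := by simp [hpar]
      simp only [solutionLoop, altLoop, hpar', if_false, Bool.false_eq_true]
      rw [hstep]
      have hcast : (a : Int) + clampB ((b:Int) - (a:Int)) q = ((a + j : Nat) : Int) := by
        rw [hB]; push_cast; ring
      rw [hcast]
      exact ih (ind + 1) (a + j) b (by omega) hb

-- ===== VERDICT (by name: the statement is the Claim_ definition above) =====
theorem solution_spec : Claim_equal_solution := by
  intro arr query _
  unfold Spec_solution solution solution_alt
  have h := loop_eq arr query 0 0 arr.length (by omega) (by omega)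
  simpa using h
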